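-- pv_equiv track=rewrite | github.com/Amayachan1/Advent2025 | Day9/Day9.py | are_any_points_inside_or_crossing
-- ===== SOURCE A (Python) =====
-- def are_any_points_inside_or_crossing(pair, shape):
--     xs = [pair[0][0], pair[1][0]]
--     ys = [pair[0][1], pair[1][1]]
--
--     for i, point in enumerate(shape):
--
--         if all([(point[0] in xs), (point[1] in ys)]):
--             continue
--
--         # Is inside?
--         x_inside = (point[0] > min(xs)) and (point[0] < max(xs))
--         y_inside = (point[1] > min(ys)) and (point[1] < max(ys))
--
--         if all([x_inside, y_inside]):
--             return True
--
--         if i == len(shape):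
--             next_i = 0
--         else:
--             next_i = i
--
--         # Is crossing?
--         next_point = shape[next_i]
--
--         # x direction
--         if (point[1] == next_point[1]) and y_inside:
--
--             minx = min([point[0], next_point[0]])
--             maxx = max([point[0], next_point[0]])
--
--             for tile_x in range(minx, maxx+1):
--                 if (tile_x > min(xs)) and (tile_x < max(xs)):
--                     return True
--
--         # y direction
--         elif (point[0] == next_point[0]) and x_inside:
--
--             miny = min([point[1], next_point[1]])
--             maxy = max([point[1], next_point[1]])
--
--             for tile_y in range(miny, maxy+1):
--                 if (tile_y > min(ys)) and (tile_y < max(ys)):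
--                     return True
--
--     return False
-- ===== SOURCE B (Python) =====
-- def are_any_points_inside_or_crossing(pair, shape):
--     (ax, ay), (bx, by) = pair
--     xlo, xhi = min(ax, bx), max(ax, bx)
--     ylo, yhi = min(ay, by), max(ay, by)
--     return any(xlo < x < xhi and ylo < y < yhi for x, y in shape)
-- ===== Notes on version B (the rewrite author's own statement) =====
-- stated objective: simpler
-- what changed: B computes the rectangle bounds once and returns whether any shape point is strictly inside via a single any(); A's crossing-detection loops are dead code (next_point always equals point) and are dropped.
import Mathlib
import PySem

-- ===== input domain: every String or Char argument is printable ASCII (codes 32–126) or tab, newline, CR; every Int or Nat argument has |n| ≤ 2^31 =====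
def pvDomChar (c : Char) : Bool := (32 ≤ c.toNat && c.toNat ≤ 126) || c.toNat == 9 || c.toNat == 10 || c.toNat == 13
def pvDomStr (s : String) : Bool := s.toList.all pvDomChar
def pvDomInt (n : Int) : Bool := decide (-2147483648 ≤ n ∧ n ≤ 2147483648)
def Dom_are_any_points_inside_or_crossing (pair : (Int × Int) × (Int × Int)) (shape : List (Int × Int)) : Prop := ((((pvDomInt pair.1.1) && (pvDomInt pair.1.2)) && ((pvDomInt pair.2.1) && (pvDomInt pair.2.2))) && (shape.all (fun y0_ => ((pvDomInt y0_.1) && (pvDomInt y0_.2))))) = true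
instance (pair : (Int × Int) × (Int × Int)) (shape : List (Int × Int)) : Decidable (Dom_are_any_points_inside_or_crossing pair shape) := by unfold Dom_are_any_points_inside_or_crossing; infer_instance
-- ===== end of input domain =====

-- B replaces A's enumerate loop (with its dead crossing-detection branches) by a single strictly-inside any() over precomputed bounds; objective: simpler.

-- ===== PORT A =====
-- Loop body of A: iterates enumerate(shape); early 'return True' = returning true, 'continue' = recursing.
-- min(xs)/max(xs) are ported via PySem.List.min?/max? with .getD 0, exact since xs/ys are 2-element lists;
-- shape[next_i] is ported via pyGet? with .getD (0,0), exact since next_i is an in-range enumerate index.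
def goA (xs ys : List Int) (shape : List (Int × Int)) : List (Int × (Int × Int)) → Bool
  | [] => false
  | (i, point) :: rest =>
    if xs.contains point.1 && ys.contains point.2 then goA xs ys shape rest
    else
      let x_inside := decide (point.1 > (PySem.List.min? xs (fun v => v)).getD 0) &&
                      decide (point.1 < (PySem.List.max? xs (fun v => v)).getD 0)
      let y_inside := decide (point.2 > (PySem.List.min? ys (fun v => v)).getD 0) &&
                      decide (point.2 < (PySem.List.max? ys (fun v => v)).getD 0)
      if x_inside && y_inside then true
      else
        let next_i : Int := if i = (shape.length : Int) then 0 else i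
        let next_point := (PySem.List.pyGet? shape next_i).getD (0, 0)
        if point.2 == next_point.2 && y_inside then
          if (PySem.List.pyRange (min point.1 next_point.1) (max point.1 next_point.1 + 1)).any
               (fun tile_x => decide (tile_x > (PySem.List.min? xs (fun v => v)).getD 0) &&
                              decide (tile_x < (PySem.List.max? xs (fun v => v)).getD 0)) then true
          else goA xs ys shape rest
        else if point.1 == next_point.1 && x_inside then
          if (PySem.List.pyRange (min point.2 next_point.2) (max point.2 next_point.2 + 1)).any
               (fun tile_y => decide (tile_y > (PySem.List.min? ys (fun v => v)).getD 0) &&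
                              decide (tile_y < (PySem.List.max? ys (fun v => v)).getD 0)) then true
          else goA xs ys shape rest
        else goA xs ys shape rest

def are_any_points_inside_or_crossing (pair : (Int × Int) × (Int × Int)) (shape : List (Int × Int)) : Bool :=
  let xs : List Int := [pair.1.1, pair.2.1]
  let ys : List Int := [pair.1.2, pair.2.2]
  goA xs ys shape (PySem.List.enumerate shape)

-- ===== PORT B =====
-- B: compute the rectangle bounds once, then a single any() for "strictly inside"; the objective is 'simpler'.
def are_any_points_inside_or_crossing_alt (pair : (Int × Int) × (Int × Int)) (shape : List (Int × Int)) : Bool :=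
  let xlo := min pair.1.1 pair.2.1
  let xhi := max pair.1.1 pair.2.1
  let ylo := min pair.1.2 pair.2.2
  let yhi := max pair.1.2 pair.2.2
  shape.any (fun p => decide (xlo < p.1) && decide (p.1 < xhi) && decide (ylo < p.2) && decide (p.2 < yhi))

-- ===== PRECONDITION & SPEC =====
def Spec_are_any_points_inside_or_crossing (pair : (Int × Int) × (Int × Int)) (shape : List (Int × Int)) (out : Bool) : Prop := out = are_any_points_inside_or_crossing_alt pair shape
instance (pair : (Int × Int) × (Int × Int)) (shape : List (Int × Int)) (out : Bool) : Decidable (Spec_are_any_points_inside_or_crossing pair shape out) := by unfold Spec_are_any_points_inside_or_crossing; infer_instance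

-- ===== CLAIM (what is proved, stated in full; the proofs are below) =====
def Claim_equal_are_any_points_inside_or_crossing : Prop := ∀ (pair : (Int × Int) × (Int × Int)) (shape : List (Int × Int)), Dom_are_any_points_inside_or_crossing pair shape → Spec_are_any_points_inside_or_crossing pair shape (are_any_points_inside_or_crossing pair shape)

-- ===== LEMMAS AND PROOFS =====

-- the strict-inside test of B, as a predicate on one point
def insideB (pair : (Int × Int) × (Int × Int)) (p : Int × Int) : Bool :=
  decide (min pair.1.1 pair.2.1 < p.1) && decide (p.1 < max pair.1.1 pair.2.1) &&
  decide (min pair.1.2 pair.2.2 < p.2) && decide (p.2 < max pair.1.2 pair.2.2)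

theorem minTwo (a b : Int) : (PySem.List.min? [a, b] (fun v => v)).getD 0 = min a b := by
  simp [PySem.List.min?_id_cons]

theorem maxTwo (a b : Int) : (PySem.List.max? [a, b] (fun v => v)).getD 0 = max a b := by
  simp [PySem.List.max?]; split <;> simp <;> omega

-- A's loop body decides exactly B's strict-inside test for each enumerated point,
-- provided each index really addresses its point (the crossing branches are dead: next_point = point).
theorem goA_eq (pair : (Int × Int) × (Int × Int)) (shape : List (Int × Int))
    (items : List (Int × (Int × Int)))
    (H : ∀ q ∈ items, q.1 ≠ (shape.length : Int) ∧ PySem.List.pyGet? shape q.1 = some q.2) :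
    goA [pair.1.1, pair.2.1] [pair.1.2, pair.2.2] shape items
      = items.any (fun q => insideB pair q.2) := by
  induction items with
  | nil => rfl
  | cons q rest ih =>
    obtain ⟨i, point⟩ := q
    obtain ⟨hne, hget⟩ := H (i, point) (by simp)
    have ihr := ih (fun q hq => H q (List.mem_cons_of_mem _ hq))
    simp only [goA, minTwo, maxTwo, List.any_cons]
    have hnext : (if i = (shape.length : Int) then 0 else i) = i := if_neg hne
    rw [hnext, hget]
    simp only [Option.getD_some]
    by_cases hc : ([pair.1.1, pair.2.1].contains point.1 && [pair.1.2, pair.2.2].contains point.2) = true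
    · -- 'continue': point is on a corner of the rectangle, hence not strictly inside
      rw [if_pos hc, ihr]
      have : insideB pair point = false := by
        simp only [List.contains_cons, List.contains_nil, Bool.and_eq_true, Bool.or_eq_true,
          beq_iff_eq] at hc
        simp only [insideB, Bool.and_eq_false_iff, decide_eq_false_iff_not, not_lt]
        rcases hc with ⟨hx | ⟨hx | h⟩, _⟩ <;> first | omega | simp at h
      simp [this]
    · rw [if_neg hc]
      by_cases hax : min pair.1.1 pair.2.1 < point.1 <;>
        by_cases hbx : point.1 < max pair.1.1 pair.2.1 <;>
        by_cases hay : min pair.1.2 pair.2.2 < point.2 <;>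
        by_cases hby : point.2 < max pair.1.2 pair.2.2 <;>
        simp [insideB, gt_iff_lt, hax, hbx, hay, hby, ihr] <;>
        (intros; exfalso; omega)

-- every enumerated pair addresses its point and its index is below the length
theorem enum_good (shape : List (Int × Int)) :
    ∀ q ∈ PySem.List.enumerate shape,
      q.1 ≠ (shape.length : Int) ∧ PySem.List.pyGet? shape q.1 = some q.2 := by
  intro q hq
  rw [PySem.List.enumerate_eq_map_pyRange shape (0, 0)] at hq
  obtain ⟨j, hj, rfl⟩ := List.mem_map.mp hq
  rw [PySem.List.mem_pyRange_one] at hj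
  simp only [PySem.List.len] at hj
  refine ⟨by omega, ?_⟩
  rw [PySem.List.pyGet?_eq_some_getElem shape hj.1 (by omega)]
  simp [PySem.List.pyGetD, PySem.List.pyGet?_eq_some_getElem shape hj.1 (by omega)]

theorem enum_map_snd (shape : List (Int × Int)) :
    ∀ s : Int, (PySem.List.enumerate shape s).map Prod.snd = shape := by
  induction shape with
  | nil => intro s; simp [PySem.List.enumerate_nil]
  | cons x t ih => intro s; rw [PySem.List.enumerate_cons]; simp [ih]

-- ===== VERDICT (by name: the statement is the Claim_ definition above) =====
theorem are_any_points_inside_or_crossing_spec : Claim_equal_are_any_points_inside_or_crossing := by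
  intro pair shape _
  unfold Spec_are_any_points_inside_or_crossing
  show are_any_points_inside_or_crossing pair shape = _
  unfold are_any_points_inside_or_crossing are_any_points_inside_or_crossing_alt
  rw [goA_eq pair shape _ (enum_good shape)]
  have := enum_map_snd shape 0
  calc (PySem.List.enumerate shape).any (fun q => insideB pair q.2)
      = ((PySem.List.enumerate shape).map Prod.snd).any (insideB pair) := by
        rw [List.any_map]; rfl
    _ = shape.any (insideB pair) := by rw [this]
    _ = _ := by
        refine List.any_congr rfl (fun p => ?_)
        simp only [insideB]
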